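-- pv_equiv track=rewrite | github.com/oculi-s/Programmers | PRG_L3_PY/디스크 컨트롤러.py | solution
-- ===== SOURCE A (Python) =====
-- def solution(jobs):
--     jobs.sort(key= lambda c:c[0])
--     jobs.sort(key= lambda c:c[1])
--     a, v = 0, jobs[0][0]
--     for x, y in jobs:
--         a += v+y-x
--         v += y
--     return a//len(jobs)
-- ===== SOURCE B (Python) =====
-- def solution(jobs):
--     jobs.sort(key=lambda c: c[0])
--     jobs.sort(key=lambda c: c[1])
--     n = len(jobs)
--     total = n * jobs[0][0] + sum((n - i) * y - x for i, (x, y) in enumerate(jobs))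
--     return total // n
-- ===== Notes on version B (the rewrite author's own statement) =====
-- stated objective: alternative
-- what changed: A's loop-carried running finish-time accumulator v is replaced by an independent position-weighted sum: total = n*jobs[0][0] + sum((n-i)*y - x), with the same two stable sorts.
import Mathlib
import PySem

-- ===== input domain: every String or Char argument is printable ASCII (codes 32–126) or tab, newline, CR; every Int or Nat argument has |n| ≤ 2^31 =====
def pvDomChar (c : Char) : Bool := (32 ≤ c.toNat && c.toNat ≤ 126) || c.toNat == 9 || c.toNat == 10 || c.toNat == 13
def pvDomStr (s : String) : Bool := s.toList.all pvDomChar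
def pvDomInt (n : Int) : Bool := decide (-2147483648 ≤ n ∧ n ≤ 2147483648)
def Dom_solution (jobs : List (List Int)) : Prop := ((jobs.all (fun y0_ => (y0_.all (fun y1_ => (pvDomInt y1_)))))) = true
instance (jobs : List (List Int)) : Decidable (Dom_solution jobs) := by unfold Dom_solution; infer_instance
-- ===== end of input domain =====

-- B replaces A's loop-carried running-sum accumulator v by an independent position-weighted
-- summation over enumerate (same two stable sorts, same value).  Objective: alternative.
-- Note: both Pythons sort `jobs` in place; the equivalence proved is about the return value.


-- ===== PORT A =====
-- jobs.sort(key=c[0]) then jobs.sort(key=c[1]) (stable), then a running-sum loop.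
def solution (jobs : List (List Int)) : Int :=
  let s1 := PySem.List.sorted jobs (fun c => c.getD 0 0)
  let s := PySem.List.sorted s1 (fun c => c.getD 1 0)
  let init : Int × Int := (0, (s.getD 0 []).getD 0 0)
  let r := s.foldl (fun (st : Int × Int) c =>
      (st.1 + (st.2 + c.getD 1 0 - c.getD 0 0), st.2 + c.getD 1 0)) init
  PySem.Int.floordiv r.1 s.length

-- ===== PORT B =====
-- Same two stable sorts; then an enumerate-indexed weighted sum with no loop-carried state.
def solution_alt (jobs : List (List Int)) : Int :=
  let s1 := PySem.List.sorted jobs (fun c => c.getD 0 0)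
  let s := PySem.List.sorted s1 (fun c => c.getD 1 0)
  let n : Int := s.length
  let total := n * (s.getD 0 []).getD 0 0 +
    ((PySem.List.enumerate s 0).map
      (fun p => (n - p.1) * p.2.getD 1 0 - p.2.getD 0 0)).sum
  PySem.Int.floordiv total n

-- ===== PRECONDITION & SPEC =====
-- Pre_ excludes exactly the inputs where Python A raises: the empty list (IndexError on
-- jobs[0][0]) and rows that are not length-2 (ValueError on unpacking / IndexError in the key).
def Pre_solution (jobs : List (List Int)) : Prop :=
  jobs ≠ [] ∧ ∀ c ∈ jobs, c.length = 2
instance (jobs : List (List Int)) : Decidable (Pre_solution jobs) := by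
  unfold Pre_solution; infer_instance
def pvWitness_solution : List (List Int) := [[0, 3], [1, 9], [2, 6]]
def Spec_solution (jobs : List (List Int)) (out : Int) : Prop := out = solution_alt jobs
instance (jobs : List (List Int)) (out : Int) : Decidable (Spec_solution jobs out) := by unfold Spec_solution; infer_instance

-- ===== CLAIM (what is proved, stated in full; the proofs are below) =====
def Claim_equal_solution : Prop := ∀ (jobs : List (List Int)), Dom_solution jobs → Pre_solution jobs → Spec_solution jobs (solution jobs)

-- ===== LEMMAS AND PROOFS =====

/-- The position-weighted sum, written structurally: at each step the head's weight
is the length of the remaining suffix. -/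
def pvG : List (List Int) → Int
  | [] => 0
  | c :: t => ((c :: t).length : Int) * c.getD 1 0 - c.getD 0 0 + pvG t

/-- A's running-sum fold computes `a + |l|·v + pvG l`. -/
theorem pvFoldA (l : List (List Int)) : ∀ (a v : Int),
    (l.foldl (fun (st : Int × Int) c =>
      (st.1 + (st.2 + c.getD 1 0 - c.getD 0 0), st.2 + c.getD 1 0)) (a, v)).1
      = a + (l.length : Int) * v + pvG l := by
  induction l with
  | nil => intro a v; simp [pvG]
  | cons c t ih =>
    intro a v
    simp only [List.foldl_cons, ih, pvG, List.length_cons]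
    push_cast
    ring

/-- B's enumerate-weighted sum equals `pvG`, for any start offset. -/
theorem pvSumB (l : List (List Int)) : ∀ (k : Int),
    ((PySem.List.enumerate l k).map
      (fun p => (k + (l.length : Int) - p.1) * p.2.getD 1 0 - p.2.getD 0 0)).sum
      = pvG l := by
  induction l with
  | nil => intro k; simp [PySem.List.enumerate_nil, pvG]
  | cons c t ih =>
    intro k
    rw [PySem.List.enumerate_cons]
    simp only [List.map_cons, List.sum_cons, pvG, List.length_cons]
    have h := ih (k + 1)
    have hmap : (PySem.List.enumerate t (k + 1)).map
        (fun p => (k + ((t.length : Int) + 1) - p.1) * p.2.getD 1 0 - p.2.getD 0 0)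
        = (PySem.List.enumerate t (k + 1)).map
        (fun p => (k + 1 + (t.length : Int) - p.1) * p.2.getD 1 0 - p.2.getD 0 0) := by
      apply List.map_congr_left; intro p _; ring_nf
    push_cast
    rw [hmap, h]
    ring

-- ===== VERDICT (by name: the statement is the Claim_ definition above) =====
theorem solution_spec : Claim_equal_solution := by
  intro jobs _ _
  unfold Spec_solution solution solution_alt
  simp only []
  rw [pvFoldA]
  have hB := pvSumB (PySem.List.sorted (PySem.List.sorted jobs (fun c => c.getD 0 0))
      (fun c => c.getD 1 0)) 0
  simp only [zero_add] at hB
  rw [hB]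
  ring_nf
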